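-- pv_equiv track=rewrite | github.com/pypi-data/pypi-mirror-366 | packages/qin2dimbot/qin2dimbot-0.5.2-py3-none-any.whl/app/mybot/handlers/command_handler/parse_command.py | _extract_link_from_args
-- ===== SOURCE A (Python) =====
-- def _extract_link_from_args(args: list) -> str:
--     """Extract link from user input"""
--     if not args:
--         return ""
--
--     link = ""
--
--     for arg in args:
--         if "http" in arg.lower() or "www." in arg.lower():
--             link = arg.strip()
--             break
--         elif not link:  # If no URL found yet, use the first argument
--             link = arg.strip()
--
--     return link
-- ===== SOURCE B (Python) =====
-- def _extract_link_from_args(args: list) -> str: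
--     """Extract link from user input"""
--     if not args:
--         return ""
--     for arg in args:
--         low = arg.lower()
--         if "http" in low or "www." in low:
--             return arg.strip()
--     return next((a.strip() for a in args if a.strip()), "")
-- ===== Notes on version B (the rewrite author's own statement) =====
-- stated objective: idiomatic
-- what changed: Drops A's maintained `link` accumulator: B returns immediately from a scan for the first URL-like arg, and otherwise falls back to a separate standard next()-over-generator for the first argument with a nonempty strip.
import Mathlib
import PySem

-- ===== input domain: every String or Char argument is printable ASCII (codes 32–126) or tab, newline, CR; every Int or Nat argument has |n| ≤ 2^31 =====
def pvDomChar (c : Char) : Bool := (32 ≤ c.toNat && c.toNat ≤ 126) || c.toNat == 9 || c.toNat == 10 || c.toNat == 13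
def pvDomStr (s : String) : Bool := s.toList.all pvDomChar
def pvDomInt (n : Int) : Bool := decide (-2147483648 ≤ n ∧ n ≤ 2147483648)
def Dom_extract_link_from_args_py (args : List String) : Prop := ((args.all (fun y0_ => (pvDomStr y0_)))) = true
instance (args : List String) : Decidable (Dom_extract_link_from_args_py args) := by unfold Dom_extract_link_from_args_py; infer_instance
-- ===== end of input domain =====

-- B drops A's maintained `link` accumulator: it scans once for the first URL-like arg
-- (returning immediately) and otherwise uses a separate first-nonempty-strip fallback (idiomatic).


-- ===== PORT A =====
-- A's loop with the `link` accumulator; break-on-URL returns, `elif not link` updates the accumulator.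
def pvALoop : List String → String → String
  | [], link => link
  | arg :: rest, link =>
    if PySem.Str.isIn "http" (PySem.Str.lower arg) || PySem.Str.isIn "www." (PySem.Str.lower arg) then
      PySem.Str.strip arg
    else if link = "" then
      pvALoop rest (PySem.Str.strip arg)
    else
      pvALoop rest link

def extract_link_from_args_py (args : List String) : String :=
  if args = [] then "" else pvALoop args ""

-- ===== PORT B =====
-- B's first scan: return the stripped first URL-like argument, if any.
def pvBFindUrl : List String → Option String
  | [] => none
  | arg :: rest =>
    let low := PySem.Str.lower arg
    if PySem.Str.isIn "http" low || PySem.Str.isIn "www." low then some (PySem.Str.strip arg)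
    else pvBFindUrl rest

-- B's fallback generator: first argument whose strip is truthy (nonempty), stripped.
def pvBFindNonempty : List String → Option String
  | [] => none
  | a :: rest =>
    if PySem.Str.strip a = "" then pvBFindNonempty rest else some (PySem.Str.strip a)

def extract_link_from_args_py_alt (args : List String) : String :=
  if args.isEmpty then ""
  else
    match pvBFindUrl args with
    | some s => s
    | none => (pvBFindNonempty args).getD ""

-- ===== PRECONDITION & SPEC =====
def Spec_extract_link_from_args_py (args : List String) (out : String) : Prop := out = extract_link_from_args_py_alt args
instance (args : List String) (out : String) : Decidable (Spec_extract_link_from_args_py args out) := by unfold Spec_extract_link_from_args_py; infer_instance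

-- ===== CLAIM (what is proved, stated in full; the proofs are below) =====
def Claim_equal_extract_link_from_args_py : Prop := ∀ (args : List String), Dom_extract_link_from_args_py args → Spec_extract_link_from_args_py args (extract_link_from_args_py args)

-- ===== LEMMAS AND PROOFS =====
-- Characterisation of A's accumulator loop in terms of B's two scans.
theorem pvALoop_eq (args : List String) (link : String) :
    pvALoop args link =
      (pvBFindUrl args).getD (if link = "" then (pvBFindNonempty args).getD "" else link) := by
  induction args generalizing link with
  | nil => simp [pvALoop, pvBFindUrl, pvBFindNonempty]
  | cons a rest ih =>
    simp only [pvALoop, pvBFindUrl, pvBFindNonempty]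
    split_ifs <;> simp [*]

-- ===== VERDICT (by name: the statement is the Claim_ definition above) =====
theorem extract_link_from_args_py_spec : Claim_equal_extract_link_from_args_py := by
  intro args _
  unfold Spec_extract_link_from_args_py
  cases args with
  | nil => rfl
  | cons a rest =>
    cases hv : pvBFindUrl (a :: rest) <;>
      simp [extract_link_from_args_py, extract_link_from_args_py_alt, pvALoop_eq, hv]
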